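-- pv_equiv track=rewrite | github.com/6ixtyn9-sudo/gold-universe-orchestrator | fetcher/satellite_bundle_fetcher.py | select_core_tabs
-- ===== SOURCE A (Python) =====
-- from typing import Any, Dict, List, Optional, Tuple
--
-- CORE_TABS = [
--     "Raw", "Clean",
--     "UpcomingRaw", "UpcomingClean", "Upcoming_Clean", "Upcoming",
--     "ResultsRaw", "ResultsClean", "Results_Clean", "Results",
--     "Standings",
--     "TeamQuarterStats_Tier2", "LeagueQuarterStats", "LeagueQuarterO_U_Stats",
--     "Stats",
-- ]
--
-- def select_core_tabs(titles: List[str]) -> Dict[str, str]: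
--     lut = {t.lower(): t for t in titles}
--     selected: Dict[str, str] = {}
--     for wanted in CORE_TABS:
--         found = lut.get(wanted.lower())
--         if found:
--             selected[wanted] = found
--     return selected
-- ===== SOURCE B (Python) =====
-- from typing import Dict, List
--
-- CORE_TABS = [
--     "Raw", "Clean",
--     "UpcomingRaw", "UpcomingClean", "Upcoming_Clean", "Upcoming",
--     "ResultsRaw", "ResultsClean", "Results_Clean", "Results",
--     "Standings",
--     "TeamQuarterStats_Tier2", "LeagueQuarterStats", "LeagueQuarterO_U_Stats",
--     "Stats",
-- ]
--
-- def select_core_tabs(titles: List[str]) -> Dict[str, str]: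
--     # reverse index: lowered core-tab name -> canonical core-tab name
--     canon = {w.lower(): w for w in CORE_TABS}
--     # single scan of the titles; last occurrence wins, as dict assignment does
--     best: Dict[str, str] = {}
--     for t in titles:
--         w = canon.get(t.lower())
--         if w is not None:
--             best[w] = t
--     return {w: best[w] for w in CORE_TABS if w in best}
-- ===== Notes on version B (the rewrite author's own statement) =====
-- stated objective: alternative
-- what changed: Instead of building a lookup table over all titles and probing it once per core tab, B builds a reverse index of the 15 core-tab names once and scans only the titles against it, keeping last-occurrence-wins matches, then emits them in CORE_TABS order.
import Mathlib
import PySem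

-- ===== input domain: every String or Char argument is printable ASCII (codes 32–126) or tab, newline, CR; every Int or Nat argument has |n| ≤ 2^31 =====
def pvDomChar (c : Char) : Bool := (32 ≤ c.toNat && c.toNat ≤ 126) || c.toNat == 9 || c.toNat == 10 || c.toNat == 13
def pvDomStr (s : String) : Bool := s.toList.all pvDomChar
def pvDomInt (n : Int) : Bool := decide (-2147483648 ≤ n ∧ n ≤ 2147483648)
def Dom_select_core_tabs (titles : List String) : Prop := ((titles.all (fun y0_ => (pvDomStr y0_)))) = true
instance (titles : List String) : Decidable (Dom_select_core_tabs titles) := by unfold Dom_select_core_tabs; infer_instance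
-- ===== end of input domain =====

-- B replaces A's title-keyed lookup table with a reverse index over the 15 core-tab names and a single scan of the titles (alternative decomposition, same cost).


-- ===== PORT A =====
def CORE_TABS : List String := [
  "Raw", "Clean",
  "UpcomingRaw", "UpcomingClean", "Upcoming_Clean", "Upcoming",
  "ResultsRaw", "ResultsClean", "Results_Clean", "Results",
  "Standings",
  "TeamQuarterStats_Tier2", "LeagueQuarterStats", "LeagueQuarterO_U_Stats",
  "Stats"]

-- lut = {t.lower(): t for t in titles}
def pvLut (titles : List String) : PySem.Dict String String :=
  titles.foldl (fun d t => d.insert (PySem.Str.lower t) t) PySem.Dict.empty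

-- body of A's 'for wanted in CORE_TABS' loop ('if found:' = found is not None and found ≠ "")
def pvSelStep (lut : PySem.Dict String String) (sel : PySem.Dict String String) (wanted : String) : PySem.Dict String String :=
  match lut.get? (PySem.Str.lower wanted) with
  | some found => if found ≠ "" then sel.insert wanted found else sel
  | none => sel

def select_core_tabs (titles : List String) : List (String × String) :=
  (CORE_TABS.foldl (pvSelStep (pvLut titles)) PySem.Dict.empty).items

-- ===== PORT B =====
-- canon = {w.lower(): w for w in CORE_TABS}
def pvCanon : PySem.Dict String String :=
  CORE_TABS.foldl (fun d w => d.insert (PySem.Str.lower w) w) PySem.Dict.empty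

-- body of B's 'for t in titles' loop
def pvBestStep (d : PySem.Dict String String) (t : String) : PySem.Dict String String :=
  match pvCanon.get? (PySem.Str.lower t) with
  | some w => d.insert w t
  | none => d

def pvBest (titles : List String) : PySem.Dict String String :=
  titles.foldl pvBestStep PySem.Dict.empty

def select_core_tabs_alt (titles : List String) : List (String × String) :=
  CORE_TABS.filterMap (fun w => ((pvBest titles).get? w).map (fun t => (w, t)))

-- ===== PRECONDITION & SPEC =====
def Spec_select_core_tabs (titles : List String) (out : List (String × String)) : Prop := out = select_core_tabs_alt titles
instance (titles : List String) (out : List (String × String)) : Decidable (Spec_select_core_tabs titles out) := by unfold Spec_select_core_tabs; infer_instance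

-- ===== CLAIM (what is proved, stated in full; the proofs are below) =====
def Claim_equal_select_core_tabs : Prop := ∀ (titles : List String), Dom_select_core_tabs titles → Spec_select_core_tabs titles (select_core_tabs titles)

-- ===== LEMMAS AND PROOFS =====

-- every item of canon is (w.lower, w) with w a core tab
theorem canon_items_spec : ∀ p ∈ pvCanon.items, p.1 = PySem.Str.lower p.2 ∧ p.2 ∈ CORE_TABS := by decide

theorem canon_get_spec (k w : String) (h : pvCanon.get? k = some w) :
    PySem.Str.lower w = k ∧ w ∈ CORE_TABS := by
  have hm := PySem.Dict.mem_items_of_get?_eq_some pvCanon h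
  have := canon_items_spec _ hm
  exact ⟨this.1.symm, this.2⟩

-- canon hits every core tab's lowered name
theorem canon_get_core (w : String) (hw : w ∈ CORE_TABS) :
    pvCanon.get? (PySem.Str.lower w) = some w := by
  fin_cases hw <;> decide

-- lowering is injective on CORE_TABS
theorem core_lower_inj (w w' : String) (hw : w ∈ CORE_TABS) (hw' : w' ∈ CORE_TABS)
    (h : PySem.Str.lower w = PySem.Str.lower w') : w = w' := by
  have h1 := canon_get_core w hw
  have h2 := canon_get_core w' hw'
  rw [h, h2] at h1
  exact (Option.some_injective _ h1).symm

-- loop invariant: the two scans agree on every core tab, and best's values lower to their key's lowering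
theorem scan_inv (titles : List String) (dL dB : PySem.Dict String String)
    (h : ∀ w ∈ CORE_TABS, dL.get? (PySem.Str.lower w) = dB.get? w ∧
          (∀ t, dB.get? w = some t → PySem.Str.lower t = PySem.Str.lower w)) :
    ∀ w ∈ CORE_TABS,
      (titles.foldl (fun d t => d.insert (PySem.Str.lower t) t) dL).get? (PySem.Str.lower w)
        = (titles.foldl pvBestStep dB).get? w ∧
      (∀ t, (titles.foldl pvBestStep dB).get? w = some t → PySem.Str.lower t = PySem.Str.lower w) := by
  induction titles generalizing dL dB with
  | nil => exact h
  | cons t ts ih =>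
    simp only [List.foldl_cons]
    apply ih
    intro w hw
    rcases hcv : pvCanon.get? (PySem.Str.lower t) with _ | w'
    · -- no core tab matches t
      have hne : PySem.Str.lower w ≠ PySem.Str.lower t := by
        intro he
        rw [← he, canon_get_core w hw] at hcv
        simp at hcv
      have hstep : pvBestStep dB t = dB := by simp [pvBestStep, hcv]
      rw [hstep, PySem.Dict.get?_insert dL _ _ t, if_neg hne]
      exact h w hw
    · obtain ⟨hlw', hw'core⟩ := canon_get_spec _ _ hcv
      have hstep : pvBestStep dB t = dB.insert w' t := by simp [pvBestStep, hcv]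
      rw [hstep]
      by_cases hww' : w = w'
      · subst hww'
        rw [PySem.Dict.get?_insert dL _ _ t, if_pos hlw', PySem.Dict.get?_insert_self]
        exact ⟨rfl, fun t' ht' => by rw [← Option.some_injective _ ht', hlw']⟩
      · have hne : PySem.Str.lower w ≠ PySem.Str.lower t := by
          rw [← hlw']
          exact fun he => hww' (core_lower_inj w w' hw hw'core he)
        rw [PySem.Dict.get?_insert dL _ _ t, if_neg hne, PySem.Dict.get?_insert_of_ne dB t hww']
        exact h w hw

theorem lut_best_agree (titles : List String) (w : String) (hw : w ∈ CORE_TABS) :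
    (pvLut titles).get? (PySem.Str.lower w) = (pvBest titles).get? w ∧
    (∀ t, (pvBest titles).get? w = some t → PySem.Str.lower t = PySem.Str.lower w) := by
  exact scan_inv titles PySem.Dict.empty PySem.Dict.empty
    (fun w hw => by simp [PySem.Dict.get?_empty]) w hw

theorem core_lower_ne_empty : ∀ w ∈ CORE_TABS, PySem.Str.lower w ≠ "" := by decide

-- the emit loop: A's selection fold over core tabs appends fresh keys = B's filterMap
theorem emit_eq (titles : List String) (ws : List String) (hnd : ws.Nodup)
    (hsub : ∀ w ∈ ws, w ∈ CORE_TABS) (sel : PySem.Dict String String)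
    (hfresh : ∀ w ∈ ws, sel.contains w = false) :
    (ws.foldl (pvSelStep (pvLut titles)) sel).items
      = sel.items ++ ws.filterMap (fun w => ((pvBest titles).get? w).map (fun t => (w, t))) := by
  induction ws generalizing sel with
  | nil => simp
  | cons w ws ih =>
    have hw : w ∈ CORE_TABS := hsub w (List.mem_cons_self ..)
    obtain ⟨hagree, hlow⟩ := lut_best_agree titles w hw
    simp only [List.foldl_cons]
    rcases hb : (pvBest titles).get? w with _ | t
    · have hstep : pvSelStep (pvLut titles) sel w = sel := by
        simp [pvSelStep, hagree, hb]
      rw [hstep, ih hnd.of_cons (fun x hx => hsub x (List.mem_cons_of_mem _ hx))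
        sel (fun x hx => hfresh x (List.mem_cons_of_mem _ hx))]
      simp [hb]
    · have htne : t ≠ "" := by
        intro he
        exact core_lower_ne_empty w hw (by rw [← hlow t hb, he]; decide)
      have hstep : pvSelStep (pvLut titles) sel w = sel.insert w t := by
        simp [pvSelStep, hagree, hb, htne]
      rw [hstep]
      rw [ih hnd.of_cons (fun x hx => hsub x (List.mem_cons_of_mem _ hx)) (sel.insert w t)
        (fun x hx => by
          rw [PySem.Dict.contains_insert sel w x t]
          have hxw : x ≠ w := by rintro rfl; exact (List.nodup_cons.mp hnd).1 hx
          simp [hxw, hfresh x (List.mem_cons_of_mem _ hx)])]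
      rw [PySem.Dict.items_insert_of_not_contains sel t (hfresh w (List.mem_cons_self ..))]
      simp [hb]

-- ===== VERDICT (by name: the statement is the Claim_ definition above) =====
theorem select_core_tabs_spec : Claim_equal_select_core_tabs := by
  intro titles _
  unfold Spec_select_core_tabs select_core_tabs select_core_tabs_alt
  rw [emit_eq titles CORE_TABS (by decide) (fun w hw => hw) PySem.Dict.empty
    (fun w _ => PySem.Dict.contains_empty w)]
  simp [PySem.Dict.empty]
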